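-- pv_equiv track=rewrite | github.com/Yuunhye/Problem_Solving | Programmers/KAKAO/괄호 변환.py | solution
-- ===== SOURCE A (Python) =====
-- def solution(p):
--     answer = ''
--     if p.strip() == "" :
--         return answer
--
--     u, v = '', ''
--     op, cl = 0, 0
--     for i in range(len(p)):
--         if p[i] == "(" :
--             op += 1
--         else :    #p[i] == ")"
--             cl += 1
--         u += p[i]
--         if op == cl :
--             v = p[i+1:]
--             break
--
--     #u가 올바른 괄호 문자열인지 판단
--     stack = []
--     check = False
--     if u[0] == "(" :
--         for j in u :
--             if stack and j==")" and stack[-1] == "(" :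
--                 stack.pop()
--             else :
--                 stack.append(j)
--         if not(stack) : #stack에 원소가 남아있지 않으면 올바른 괄호 문자열이다.
--             check = True
--
--     if check :
--         answer += u
--         answer += solution(v)
--     else :
--         answer += "("
--         answer += solution(v)
--         answer += ")"
--         u = list(map(lambda x : "(" if x==")" else ")",u[1:len(u)-1]))
--         answer += ''.join(u)
--     return answer
-- ===== SOURCE B (Python) =====
-- def solution(p):
--     # Iterative rewrite: one forward sweep over indices with an explicit stack of
--     # pending trailers instead of A's recursion, slice-built prefix string and
--     # second stack pass; correctness of each minimal balanced unit is decided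
--     # inline by a balance counter plus a purity flag.
--     out = []
--     trail = []
--     n = len(p)
--     i = 0
--     while p[i:].strip() != "":
--         bal = 0
--         pure = True
--         k = n
--         for j in range(i, n):
--             c = p[j]
--             if c == '(':
--                 bal += 1
--             else:
--                 bal -= 1
--                 if c != ')':
--                     pure = False
--             if bal == 0:
--                 k = j + 1
--                 break
--         if bal == 0 and pure and p[i] == '(':
--             out.append(p[i:k])
--         else:
--             out.append('(')
--             trail.append(')' + ''.join('(' if c == ')' else ')' for c in p[i + 1:k - 1]))
--         i = k
--     while trail:
--         out.append(trail.pop())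
--     return ''.join(out)
-- ===== Notes on version B (the rewrite author's own statement) =====
-- stated objective: alternative
-- what changed: A is recursive, re-building the prefix u character by character, re-scanning it with an explicit stack and concatenating around the recursive call; B is iterative: one index-based while sweep over the string with an output builder and an explicit stack of pending trailers, deciding each unit's correctness inline with a balance counter and purity flag (no recursion, no second stack pass over u).
import Mathlib
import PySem

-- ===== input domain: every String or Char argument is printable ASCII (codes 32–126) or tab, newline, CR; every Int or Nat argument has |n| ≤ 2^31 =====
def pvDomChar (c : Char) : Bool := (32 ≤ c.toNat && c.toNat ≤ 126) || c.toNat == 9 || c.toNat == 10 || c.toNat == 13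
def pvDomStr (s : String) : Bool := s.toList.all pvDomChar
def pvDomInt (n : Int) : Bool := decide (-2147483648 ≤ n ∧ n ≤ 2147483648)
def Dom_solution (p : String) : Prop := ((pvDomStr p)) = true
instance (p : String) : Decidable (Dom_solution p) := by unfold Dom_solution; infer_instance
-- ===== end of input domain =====

-- B replaces A's recursion (slice-built prefix, second stack pass, post-recursion
-- concatenation) by one iterative sweep with an output builder and an explicit
-- stack of pending trailers (alternative decomposition, same cost class).

-- ===== PORT A =====
-- A's first loop: walks p, counts '(' as op and everything else as cl, accumulates u,
-- and on op == cl breaks with v = p[i+1:] (here: the untraversed rest).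
def aLoop : List Char → Int → Int → List Char → (List Char × List Char)
  | [], _, _, u => (u, [])
  | c :: rest, op, cl, u =>
    let op' := if c = '(' then op + 1 else op
    let cl' := if c = '(' then cl else cl + 1
    if op' = cl' then (u ++ [c], rest) else aLoop rest op' cl' (u ++ [c])

-- A's stack loop over u (stack top at the END of the list, as Python's append/pop(-1)).
def aStack : List Char → List Char → List Char
  | [], st => st
  | j :: rest, st =>
    if st ≠ [] ∧ j = ')' ∧ st.getLast? = some '(' then aStack rest st.dropLast
    else aStack rest (st ++ [j])

-- needed by solutionCore's decreasing_by
theorem aLoop_snd_lt : ∀ (l : List Char) (op cl : Int) (u : List Char), l ≠ [] →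
    (aLoop l op cl u).2.length < l.length := by
  intro l
  induction l with
  | nil => intro _ _ _ h; exact absurd rfl h
  | cons c rest ih =>
    intro op cl u _
    by_cases hc : c = '(' <;> simp only [aLoop, hc, reduceIte] <;> split
    all_goals
      first
        | simpa using Nat.lt_succ_self rest.length
        | (rcases Decidable.em (rest = []) with h | h
           · subst h; simp [aLoop]
           · exact Nat.lt_succ_of_lt (ih _ _ _ h))

theorem strip_ne_nil {l : List Char} (h : PySem.Chars.strip l ≠ []) : l ≠ [] := by
  intro he; subst he; exact h rfl

def solutionCore (l : List Char) : List Char :=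
  if hs : PySem.Chars.strip l = [] then []
  else
    -- check: u[0] == '(' and the stack is empty after the loop
    if PySem.List.pyGet? (aLoop l 0 0 []).1 0 = some '(' ∧ aStack (aLoop l 0 0 []).1 [] = []
    then (aLoop l 0 0 []).1 ++ solutionCore (aLoop l 0 0 []).2
    else ['('] ++ solutionCore (aLoop l 0 0 []).2 ++ [')']
         ++ (PySem.List.slice (aLoop l 0 0 []).1 (some 1)
              (some (((aLoop l 0 0 []).1.length : Int) - 1))).map
            (fun x => if x = ')' then '(' else ')')
termination_by l.length
decreasing_by
  · exact aLoop_snd_lt l 0 0 [] (strip_ne_nil hs)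
  · exact aLoop_snd_lt l 0 0 [] (strip_ne_nil hs)

def solution (p : String) : String := String.ofList (solutionCore p.toList)

-- ===== PORT B =====
-- B's inner for-loop over the current segment: returns (index one past the break
-- point, or segment length when no break; final bal; purity flag).
def bScan : List Char → Int → Bool → Nat × Int × Bool
  | [], bal, pure => (0, bal, pure)
  | c :: rest, bal, pure =>
    let bal' := if c = '(' then bal + 1 else bal - 1
    let pure' := if c = '(' then pure else if c = ')' then pure else false
    if bal' = 0 then (1, bal', pure')
    else ((bScan rest bal' pure').1 + 1, (bScan rest bal' pure').2)

-- needed by solLoop's decreasing_by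
theorem bScan_fst_pos : ∀ (l : List Char) (bal : Int) (pure : Bool), l ≠ [] →
    1 ≤ (bScan l bal pure).1 := by
  intro l bal pure h
  cases l with
  | nil => exact absurd rfl h
  | cons c rest =>
    by_cases hc : c = '(' <;> simp only [bScan, hc, reduceIte] <;> split <;> simp

-- B's while loop: l is the unprocessed tail p[i:], out the builder, trail the
-- stack of pending trailers (head = most recently pushed; the final pop loop
-- appends them head first, i.e. flattens the list).
def solLoop (l : List Char) (out : List Char) (trail : List (List Char)) : List Char :=
  if hs : PySem.Chars.strip l = [] then out ++ trail.flatten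
  else
    if (bScan l 0 true).2.1 = 0 ∧ (bScan l 0 true).2.2 = true
        ∧ PySem.List.pyGet? l 0 = some '('
    then solLoop (l.drop (bScan l 0 true).1) (out ++ l.take (bScan l 0 true).1) trail
    else solLoop (l.drop (bScan l 0 true).1) (out ++ ['('])
      (([')'] ++ (PySem.List.slice l (some 1) (some (((bScan l 0 true).1 : Int) - 1))).map
          (fun c => if c = ')' then '(' else ')')) :: trail)
termination_by l.length
decreasing_by
  all_goals
    have h1 := bScan_fst_pos l 0 true (strip_ne_nil hs)
    have h2 : 0 < l.length := List.length_pos_iff.mpr (strip_ne_nil hs)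
    simp only [List.length_drop]; omega

def solution_alt (p : String) : String := String.ofList (solLoop p.toList [] [])

-- ===== PRECONDITION & SPEC =====
def Spec_solution (p : String) (out : String) : Prop := out = solution_alt p
instance (p : String) (out : String) : Decidable (Spec_solution p out) := by unfold Spec_solution; infer_instance

-- ===== CLAIM (what is proved, stated in full; the proofs are below) =====
def Claim_equal_solution : Prop := ∀ (p : String), Dom_solution p → Spec_solution p (solution p)

-- ===== LEMMAS AND PROOFS =====

def balC (c : Char) : Int := if c = '(' then 1 else -1
def balL (l : List Char) : Int := (l.map balC).sum
def isParen (c : Char) : Bool := c = '(' || c = ')'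
def pureL (l : List Char) : Bool := l.all isParen
def npc (l : List Char) : Nat := l.countP (fun c => !isParen c)

theorem balL_nil : balL [] = 0 := rfl
theorem balL_cons (c : Char) (l : List Char) : balL (c :: l) = balC c + balL l := by
  simp [balL]
theorem balL_append (a b : List Char) : balL (a ++ b) = balL a + balL b := by
  simp [balL]
theorem npc_append (a b : List Char) : npc (a ++ b) = npc a + npc b := by
  simp [npc]

theorem aLoop_eq : ∀ (l : List Char) (op cl : Int) (u : List Char) (pr : Bool),
    aLoop l op cl u = (u ++ l.take (bScan l (op - cl) pr).1, l.drop (bScan l (op - cl) pr).1) := by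
  intro l
  induction l with
  | nil => intro op cl u pr; simp [aLoop, bScan]
  | cons c rest ih =>
    intro op cl u pr
    by_cases hc : c = '('
    · subst hc
      simp only [aLoop, bScan, reduceIte]
      by_cases hb : op - cl + 1 = 0
      · have h1 : op + 1 = cl := by omega
        simp [h1, hb]
      · have h1 : ¬ (op + 1 = cl) := by omega
        have h2 : op + 1 - cl = op - cl + 1 := by ring
        simp only [h1, hb, reduceIte]
        rw [ih (op + 1) cl (u ++ ['(']) pr, h2]
        simp [List.take_succ_cons, List.drop_succ_cons]
    · simp only [aLoop, bScan, hc, reduceIte]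
      by_cases hb : op - cl - 1 = 0
      · have h1 : op = cl + 1 := by omega
        simp [h1, hb]
      · have h1 : ¬ (op = cl + 1) := by omega
        have h2 : op - (cl + 1) = op - cl - 1 := by ring
        simp only [h1, hb, reduceIte]
        rw [ih op (cl + 1) (u ++ [c]) (decide (c = ')') && pr), h2]
        simp [List.take_succ_cons, List.drop_succ_cons]

theorem bScan_fst_le : ∀ (l : List Char) (b : Int) (p : Bool), (bScan l b p).1 ≤ l.length := by
  intro l
  induction l with
  | nil => intro b p; simp [bScan]
  | cons c rest ih =>
    intro b p
    by_cases hc : c = '(' <;> simp only [bScan, hc, reduceIte] <;> split <;>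
      simp [Nat.succ_le_succ (ih _ _)]

theorem bScan_bal : ∀ (l : List Char) (b : Int) (p : Bool),
    (bScan l b p).2.1 = b + balL (l.take (bScan l b p).1) := by
  intro l
  induction l with
  | nil => intro b p; simp [bScan, balL]
  | cons c rest ih =>
    intro b p
    by_cases hc : c = '(' <;> simp only [bScan, hc, reduceIte] <;> split <;>
      simp [List.take_succ_cons, balL_cons, balL_nil, balC, hc, ih] <;> ring

theorem bScan_pure : ∀ (l : List Char) (b : Int) (p : Bool),
    (bScan l b p).2.2 = (p && pureL (l.take (bScan l b p).1)) := by
  intro l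
  induction l with
  | nil => intro b p; simp [bScan, pureL]
  | cons c rest ih =>
    intro b p
    by_cases hc : c = '('
    · subst hc
      simp only [bScan, reduceIte]
      split <;> simp [List.take_succ_cons, pureL, isParen, ih]
    · by_cases hc2 : c = ')'
      · subst hc2
        simp only [bScan, hc, reduceIte]
        split <;> simp [List.take_succ_cons, pureL, isParen, ih]
      · simp only [bScan, hc, hc2, reduceIte]
        split <;> simp [List.take_succ_cons, pureL, isParen, hc, hc2, ih, Bool.and_assoc]

theorem bScan_min : ∀ (l : List Char) (b : Int) (p : Bool) (j : Nat),
    0 < j → j < (bScan l b p).1 → b + balL (l.take j) ≠ 0 := by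
  intro l
  induction l with
  | nil => intro b p j hj hjk; simp [bScan] at hjk
  | cons c rest ih =>
    intro b p j hj hjk
    cases j with
    | zero => omega
    | succ j' =>
      rw [List.take_succ_cons, balL_cons]
      by_cases hc : c = '('
      · subst hc
        rw [show balC '(' = 1 from rfl]
        simp only [bScan, reduceIte] at hjk
        by_cases hb : b + 1 = 0
        · rw [if_pos hb] at hjk
          simp at hjk
        · rw [if_neg hb] at hjk
          simp only at hjk
          cases Nat.eq_zero_or_pos j' with
          | inl h0 => subst h0; simp only [List.take_zero, balL_nil]; omega
          | inr hpos =>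
            have := ih (b + 1) p j' hpos (by omega)
            omega
      · rw [show balC c = -1 from by simp [balC, hc]]
        simp only [bScan, hc, reduceIte] at hjk
        by_cases hb : b - 1 = 0
        · rw [if_pos hb] at hjk
          simp at hjk
        · rw [if_neg hb] at hjk
          simp only at hjk
          cases Nat.eq_zero_or_pos j' with
          | inl h0 => subst h0; simp only [List.take_zero, balL_nil]; omega
          | inr hpos =>
            have := ih (b - 1) (if c = ')' then p else false) j' hpos (by omega)
            omega

theorem aStack_bal : ∀ (u st : List Char), balL (aStack u st) = balL st + balL u := by
  intro u
  induction u with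
  | nil => intro st; simp [aStack, balL_nil]
  | cons j rest ih =>
    intro st
    simp only [aStack]
    split
    · rename_i h
      obtain ⟨hne, hj, hlast⟩ := h
      have hst : st.dropLast ++ [st.getLast hne] = st := List.dropLast_append_getLast hne
      have hl : st.getLast hne = '(' := List.getLast_of_mem_getLast? hlast
      have hb : balL st = balL st.dropLast + 1 := by
        conv_lhs => rw [← hst]
        rw [balL_append, hl]
        simp [balL_cons, balL_nil, balC]
      rw [ih st.dropLast, balL_cons, hj]
      have hbc : balC ')' = -1 := rfl
      rw [hbc]
      omega
    · rw [ih (st ++ [j]), balL_append, balL_cons]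
      simp [balL_cons, balL_nil]
      ring

theorem aStack_npc : ∀ (u st : List Char), npc st + npc u ≤ npc (aStack u st) := by
  intro u
  induction u with
  | nil => intro st; simp [aStack, npc]
  | cons j rest ih =>
    intro st
    simp only [aStack]
    split
    · rename_i h
      obtain ⟨hne, hj, hlast⟩ := h
      have hst : st.dropLast ++ [st.getLast hne] = st := List.dropLast_append_getLast hne
      have hl : st.getLast hne = '(' := List.getLast_of_mem_getLast? hlast
      have hd : npc st = npc st.dropLast := by
        conv_lhs => rw [← hst]
        rw [npc_append, hl]
        simp [npc, isParen]
      have hju : npc (j :: rest) = npc rest := by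
        rw [show (j :: rest) = [j] ++ rest from rfl, npc_append, hj]
        simp [npc, isParen]
      have := ih st.dropLast
      omega
    · have h1 : npc (st ++ [j]) = npc st + npc [j] := npc_append st [j]
      have h2 : npc (j :: rest) = npc [j] + npc rest := by
        rw [show (j :: rest) = [j] ++ rest from rfl, npc_append]
      have := ih (st ++ [j])
      omega

theorem npc_pos_of_impure {u : List Char} (h : pureL u = false) : 0 < npc u := by
  unfold npc
  rw [List.countP_pos_iff]
  unfold pureL at h
  rw [List.all_eq_false] at h
  obtain ⟨c, hc, hnp⟩ := h
  exact ⟨c, hc, by simp [hnp]⟩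

theorem aStack_impure (u : List Char) (h : pureL u = false) : aStack u [] ≠ [] := by
  intro he
  have h1 := aStack_npc u []
  rw [he] at h1
  have h2 := npc_pos_of_impure h
  rw [show npc ([] : List Char) = 0 from rfl] at h1
  omega

theorem aStack_pure_run : ∀ (u : List Char) (b : Nat), pureL u = true →
    (∀ j ≤ u.length, 0 ≤ (b : Int) + balL (u.take j)) →
    aStack u (List.replicate b '(') = List.replicate ((b : Int) + balL u).toNat '(' := by
  intro u
  induction u with
  | nil =>
    intro b _ _
    simp [aStack, balL_nil]
  | cons c rest ih =>
    intro b hp hnn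
    have hpr : pureL rest = true := by
      simp [pureL] at hp ⊢; exact hp.2
    by_cases hc : c = '('
    · -- push branch: condition `c = ')'` is false
      subst hc
      have hstep : aStack ('(' :: rest) (List.replicate b '(') =
          aStack rest (List.replicate (b + 1) '(') := by
        simp only [aStack]
        rw [if_neg]
        · rw [← List.replicate_succ']
        · rintro ⟨-, hj, -⟩; exact absurd hj (by decide)
      rw [hstep, ih (b + 1) hpr]
      · rw [balL_cons, show balC '(' = 1 from rfl]
        congr 1
        push_cast
        ring_nf
      · intro j hj
        have := hnn (j + 1) (by simpa using Nat.succ_le_succ hj)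
        rw [List.take_succ_cons, balL_cons, show balC '(' = 1 from rfl] at this
        push_cast
        omega
    · -- c must be ')' by purity; pop branch
      have hc2 : c = ')' := by
        simp [pureL, isParen, hc] at hp
        exact hp.1
      have hb1 : 1 ≤ b := by
        have := hnn 1 (by simp)
        rw [List.take_succ_cons, List.take_zero, balL_cons, balL_nil,
          show balC c = -1 from by simp [balC, hc]] at this
        omega
      obtain ⟨b', rfl⟩ : ∃ b', b = b' + 1 := ⟨b - 1, by omega⟩
      have hne : List.replicate (b' + 1) '(' ≠ [] := by simp [List.replicate_succ]
      have hstep : aStack (c :: rest) (List.replicate (b' + 1) '(') =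
          aStack rest (List.replicate b' '(') := by
        simp only [aStack]
        rw [if_pos]
        · rw [List.replicate_succ', List.dropLast_concat]
        · exact ⟨hne, hc2, by rw [List.replicate_succ', List.getLast?_concat]⟩
      rw [hstep, ih b' hpr]
      · rw [balL_cons, show balC c = -1 from by simp [balC, hc]]
        congr 1
        push_cast
        ring_nf
      · intro j hj
        have := hnn (j + 1) (by simpa using Nat.succ_le_succ hj)
        rw [List.take_succ_cons, balL_cons, show balC c = -1 from by simp [balC, hc]] at this
        push_cast
        omega

theorem balC_ge (c : Char) : -1 ≤ balC c := by
  unfold balC; split <;> omega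

theorem prefix_nonneg (l : List Char) (hhead : l[0]? = some '(')
    (hkle : (bScan l 0 true).1 ≤ l.length)
    (hbal : balL (l.take (bScan l 0 true).1) = 0) :
    ∀ j ≤ (bScan l 0 true).1, 0 ≤ balL (l.take j) := by
  intro j
  induction j with
  | zero => intro _; simp [balL_nil]
  | succ j' ihj =>
    intro hj
    rcases Nat.lt_or_ge (j' + 1) (bScan l 0 true).1 with hlt | hge
    · have hjlen : j' < l.length := by omega
      have hstep : balL (l.take (j' + 1)) = balL (l.take j') + balC l[j'] := by
        rw [List.take_add_one, List.getElem?_eq_getElem hjlen, balL_append]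
        simp [balL_cons, balL_nil]
      cases Nat.eq_zero_or_pos j' with
      | inl h0 =>
        subst h0
        have : l[0] = '(' := by
          rw [List.getElem?_eq_getElem (by omega)] at hhead
          exact Option.some.inj hhead
        simp [hstep, balL_nil, this, balC]
      | inr hpos =>
        have hne0 : (0 : Int) + balL (l.take j') ≠ 0 :=
          bScan_min l 0 true j' hpos (by omega)
        have h1 : 0 ≤ balL (l.take j') := ihj (by omega)
        have h2 := balC_ge l[j']
        omega
    · have : j' + 1 = (bScan l 0 true).1 := by omega
      rw [this, hbal]

theorem length_take_k {l : List Char} (hkle : (bScan l 0 true).1 ≤ l.length) :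
    (l.take (bScan l 0 true).1).length = (bScan l 0 true).1 := by
  simp [List.length_take]; omega

theorem check_iff (l : List Char) (hne : l ≠ []) :
    ((PySem.List.pyGet? (l.take (bScan l 0 true).1) 0 = some '(' ∧
      aStack (l.take (bScan l 0 true).1) [] = [])
    ↔ ((bScan l 0 true).2.1 = 0 ∧ (bScan l 0 true).2.2 = true ∧
       PySem.List.pyGet? l 0 = some '(')) := by
  have hk1 : 1 ≤ (bScan l 0 true).1 := bScan_fst_pos l 0 true hne
  have hkle : (bScan l 0 true).1 ≤ l.length := bScan_fst_le l 0 true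
  have hhead : PySem.List.pyGet? (l.take (bScan l 0 true).1) 0 = PySem.List.pyGet? l 0 := by
    rw [PySem.List.pyGet?_zero, PySem.List.pyGet?_zero, List.getElem?_take_of_lt (by omega)]
  have hbal := bScan_bal l 0 true
  have hpure := bScan_pure l 0 true
  constructor
  · rintro ⟨hh, hs⟩
    have hpu : pureL (l.take (bScan l 0 true).1) = true := by
      cases hp : pureL (l.take (bScan l 0 true).1) with
      | false => exact absurd hs (aStack_impure _ hp)
      | true => rfl
    have hb0 : balL (l.take (bScan l 0 true).1) = 0 := by
      have := aStack_bal (l.take (bScan l 0 true).1) []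
      rw [hs] at this
      simpa [balL_nil] using this.symm
    refine ⟨by rw [hbal, hb0]; ring, by rw [hpure, hpu]; simp, by rw [← hhead]; exact hh⟩
  · rintro ⟨hb, hp, hh⟩
    have hb0 : balL (l.take (bScan l 0 true).1) = 0 := by rw [hbal] at hb; omega
    have hpu : pureL (l.take (bScan l 0 true).1) = true := by
      rw [hpure] at hp; simpa using hp
    refine ⟨by rw [hhead]; exact hh, ?_⟩
    have hnn : ∀ j ≤ (l.take (bScan l 0 true).1).length,
        0 ≤ ((0 : Nat) : Int) + balL ((l.take (bScan l 0 true).1).take j) := by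
      intro j hj
      rw [length_take_k hkle] at hj
      rw [List.take_take, Nat.min_eq_left hj]
      have hh0 : l[0]? = some '(' := by rw [PySem.List.pyGet?_zero] at hh; exact hh
      have := prefix_nonneg l hh0 hkle hb0 j hj
      omega
    have := aStack_pure_run (l.take (bScan l 0 true).1) 0 hpu hnn
    simpa [hb0] using this

theorem slice_take_eq {l : List Char} (hk1 : 1 ≤ (bScan l 0 true).1)
    (hkle : (bScan l 0 true).1 ≤ l.length) :
    PySem.List.slice (l.take (bScan l 0 true).1) (some 1)
      (some (((l.take (bScan l 0 true).1).length : Int) - 1)) =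
    PySem.List.slice l (some 1) (some (((bScan l 0 true).1 : Int) - 1)) := by
  rw [length_take_k hkle]
  rw [PySem.List.slice_toNat _ (by omega) (by omega), PySem.List.slice_toNat _ (by omega) (by omega)]
  rw [List.drop_take]
  rw [List.take_take]
  congr 1
  omega

-- the loop invariant: B's iterative sweep equals A's recursion framed by the
-- builder and the pending-trailer stack
theorem solLoop_eq : ∀ (n : Nat) (l out : List Char) (trail : List (List Char)),
    l.length ≤ n → solLoop l out trail = out ++ solutionCore l ++ trail.flatten := by
  intro n
  induction n with
  | zero =>
    intro l out trail hl
    have : l = [] := List.eq_nil_of_length_eq_zero (Nat.le_zero.mp hl)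
    subst this
    have h : PySem.Chars.strip ([] : List Char) = [] := rfl
    rw [solLoop, solutionCore, dif_pos h, dif_pos h]
    simp
  | succ n ih =>
    intro l out trail hl
    rw [solLoop, solutionCore]
    by_cases hs : PySem.Chars.strip l = []
    · rw [dif_pos hs, dif_pos hs]; simp
    · rw [dif_neg hs, dif_neg hs]
      have hne : l ≠ [] := strip_ne_nil hs
      have hk1 : 1 ≤ (bScan l 0 true).1 := bScan_fst_pos l 0 true hne
      have hkle : (bScan l 0 true).1 ≤ l.length := bScan_fst_le l 0 true
      have hlen : 0 < l.length := List.length_pos_iff.mpr hne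
      have hA : aLoop l 0 0 [] = (l.take (bScan l 0 true).1, l.drop (bScan l 0 true).1) := by
        have h := aLoop_eq l 0 0 [] true
        simpa using h
      have hdrop : (l.drop (bScan l 0 true).1).length ≤ n := by
        rw [List.length_drop]; omega
      rw [hA]
      simp only []
      by_cases hcond : ((bScan l 0 true).2.1 = 0 ∧ (bScan l 0 true).2.2 = true ∧
          PySem.List.pyGet? l 0 = some '(')
      · rw [if_pos hcond, if_pos ((check_iff l hne).mpr hcond),
          ih (l.drop (bScan l 0 true).1) (out ++ l.take (bScan l 0 true).1) trail hdrop]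
        simp
      · rw [if_neg hcond, if_neg (fun h => hcond ((check_iff l hne).mp h)),
          ih (l.drop (bScan l 0 true).1) (out ++ ['(']) _ hdrop,
          slice_take_eq hk1 hkle]
        simp

-- ===== VERDICT (by name: the statement is the Claim_ definition above) =====
theorem solution_spec : Claim_equal_solution := by
  intro p _
  unfold Spec_solution solution solution_alt
  rw [solLoop_eq p.toList.length p.toList [] [] le_rfl]
  simp
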